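-- pv_equiv track=rewrite | github.com/ZhaoChenBiuBiuBiu/DictionaryLearning_for_ShearTransferStrength_of_ConcreteJoints | utils_Product.py | BuildLib
-- ===== SOURCE A (Python) =====
-- import itertools
--
-- def BuildLib(candidates, order):
--     combos = list(itertools.combinations_with_replacement('0123', order))
--     Lib = []
--     for combo in combos:
--         candidate_product = 1
--         for sample in range(order):
--             candidate_product *= candidates[int(combo[sample])]
--
--         Lib.append(candidate_product)
--
--     return Lib
-- ===== SOURCE B (Python) =====
-- def BuildLib(candidates, order):
--     # DFS over nondecreasing index sequences, carrying the running prefix product.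
--     out = []
--     def dfs(start, remaining, prod):
--         if remaining == 0:
--             out.append(prod)
--             return
--         for i in range(start, 4):
--             dfs(i, remaining - 1, prod * candidates[i])
--     dfs(0, order, 1)
--     return out
-- ===== Notes on version B (the rewrite author's own statement) =====
-- stated objective: alternative
-- what changed: A materialises all C(order+3,3) combinations with itertools and recomputes each product from scratch with an order-length inner loop; B enumerates the same multisets itself by DFS carrying a running prefix product, doing O(1) amortised work per emitted value (measured ~2x at mid sizes, not confirmed at the largest).
import Mathlib
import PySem

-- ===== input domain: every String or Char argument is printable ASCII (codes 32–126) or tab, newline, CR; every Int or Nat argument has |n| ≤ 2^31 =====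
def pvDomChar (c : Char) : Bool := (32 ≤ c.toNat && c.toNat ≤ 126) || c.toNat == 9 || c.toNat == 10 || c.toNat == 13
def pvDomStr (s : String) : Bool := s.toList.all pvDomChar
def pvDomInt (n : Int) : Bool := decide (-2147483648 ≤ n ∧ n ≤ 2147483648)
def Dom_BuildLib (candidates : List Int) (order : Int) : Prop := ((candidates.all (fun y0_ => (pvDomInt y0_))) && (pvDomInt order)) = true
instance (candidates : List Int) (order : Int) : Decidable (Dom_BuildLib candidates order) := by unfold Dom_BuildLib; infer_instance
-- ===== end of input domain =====

-- B replaces A's "materialise all combinations, then recompute each product from scratch"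
-- with a DFS that carries the running prefix product (objective: alternative algorithm).

-- ===== PORT A =====
-- itertools.combinations_with_replacement('0123', r), with the digit characters already
-- converted by int() to the indices 0..3 they denote (exact: every tuple element is one
-- of '0'..'3' and int() of such a character is its digit value).
def pvCwr (pool : List Int) (r : Nat) : List (List Int) :=
  match pool, r with
  | _, 0 => [[]]
  | [], _ + 1 => []
  | x :: xs, r' + 1 => ((pvCwr (x :: xs) r').map (fun c => x :: c)) ++ pvCwr xs (r' + 1)
termination_by (r, pool.length)
decreasing_by all_goals (simp_wf; omega)

def BuildLib (candidates : List Int) (order : Int) : List Int :=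
  (pvCwr [0, 1, 2, 3] order.toNat).map (fun combo =>
    (PySem.List.pyRange 0 order 1).foldl
      (fun p s => p * PySem.List.pyGetD candidates (PySem.List.pyGetD combo s 0) 0) 1)

-- ===== PORT B =====
-- dfs(start, remaining, prod): appends prod when remaining == 0, else recurses over
-- i in range(start, 4) with prod * candidates[i]; list accumulation is by ++ of the
-- branches (same append order as the Python out.append calls).
def pvDfs (candidates : List Int) (start : Nat) (remaining : Nat) (prod : Int) : List Int :=
  match remaining with
  | 0 => [prod]
  | r + 1 =>
    (List.range' start (4 - start)).flatMap
      (fun i => pvDfs candidates i r (prod * PySem.List.pyGetD candidates (Int.ofNat i) 0))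

def BuildLib_alt (candidates : List Int) (order : Int) : List Int :=
  pvDfs candidates 0 order.toNat 1

-- ===== PRECONDITION & SPEC =====
-- Pre_ is exactly where the Python A returns: order < 0 raises ValueError in
-- combinations_with_replacement, and for order ≥ 1 every index 0..3 is used, so
-- candidates with fewer than 4 elements raise IndexError.
def Pre_BuildLib (candidates : List Int) (order : Int) : Prop :=
  0 ≤ order ∧ (order = 0 ∨ 4 ≤ candidates.length)
instance (candidates : List Int) (order : Int) : Decidable (Pre_BuildLib candidates order) := by
  unfold Pre_BuildLib; infer_instance
def pvWitness_BuildLib : List Int × Int := ([2, 3, 5, 7], 2)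

def Spec_BuildLib (candidates : List Int) (order : Int) (out : List Int) : Prop := out = BuildLib_alt candidates order
instance (candidates : List Int) (order : Int) (out : List Int) : Decidable (Spec_BuildLib candidates order out) := by unfold Spec_BuildLib; infer_instance

-- ===== CLAIM (what is proved, stated in full; the proofs are below) =====
def Claim_equal_BuildLib : Prop := ∀ (candidates : List Int) (order : Int), Dom_BuildLib candidates order → Pre_BuildLib candidates order → Spec_BuildLib candidates order (BuildLib candidates order)

-- ===== LEMMAS AND PROOFS =====

-- the pool [s, s+1, …, 3] that dfs's range(start, 4) walks, as Ints
def pvIntR (s : Nat) : List Int := (List.range' s (4 - s)).map Int.ofNat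

-- every combination produced by pvCwr _ r has length r
theorem pvCwr_length (pool : List Int) (r : Nat) :
    ∀ c ∈ pvCwr pool r, c.length = r := by
  induction pool, r using pvCwr.induct with
  | case1 pool => intro c hc; simp [pvCwr] at hc; simp [hc]
  | case2 r => intro c hc; simp [pvCwr] at hc
  | case3 x xs r ih1 ih2 =>
    intro c hc
    simp only [pvCwr, List.mem_append, List.mem_map] at hc
    rcases hc with ⟨d, hd, rfl⟩ | hc
    · simp [ih1 d hd]
    · exact ih2 c hc

-- the DFS with running product equals mapping the fold-product over the combination list
theorem pvDfs_eq (cand : List Int) :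
    ∀ (r n s : Nat), s + n = 4 → ∀ p : Int,
      pvDfs cand s r p =
        (pvCwr (pvIntR s) r).map
          (fun c => c.foldl (fun q i => q * PySem.List.pyGetD cand i 0) p) := by
  intro r
  induction r with
  | zero =>
    intro n s _ p
    simp [pvDfs, pvCwr]
  | succ r ihr =>
    intro n
    induction n with
    | zero =>
      intro s hs p
      have hs4 : s = 4 := by omega
      subst hs4
      simp [pvDfs, pvCwr, pvIntR]
    | succ n ihn =>
      intro s hs p
      have h1 : 4 - s = n + 1 := by omega
      have h2 : 4 - (s + 1) = n := by omega
      have hrange : List.range' s (4 - s) = s :: List.range' (s + 1) n := by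
        rw [h1, List.range'_succ]
      have hintR : pvIntR s = (Int.ofNat s) :: pvIntR (s + 1) := by
        simp only [pvIntR, hrange, h2, List.map_cons]
      -- left side: split off i = s, and recognise the rest as pvDfs at start s+1
      have hrest :
          (List.range' (s + 1) n).flatMap
              (fun i => pvDfs cand i r (p * PySem.List.pyGetD cand (Int.ofNat i) 0)) =
            pvDfs cand (s + 1) (r + 1) p := by
        simp only [pvDfs, h2]
      calc pvDfs cand s (r + 1) p
          = pvDfs cand s r (p * PySem.List.pyGetD cand (Int.ofNat s) 0) ++
              pvDfs cand (s + 1) (r + 1) p := by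
            simp only [pvDfs, hrange, List.flatMap_cons]
            rw [h2, hrest]
        _ = (pvCwr (pvIntR s) r).map
              (fun c => c.foldl (fun q i => q * PySem.List.pyGetD cand i 0)
                (p * PySem.List.pyGetD cand (Int.ofNat s) 0)) ++
            (pvCwr (pvIntR (s + 1)) (r + 1)).map
              (fun c => c.foldl (fun q i => q * PySem.List.pyGetD cand i 0) p) := by
            rw [ihr (n + 1) s hs, ihn (s + 1) (by omega)]
        _ = (pvCwr (pvIntR s) (r + 1)).map
              (fun c => c.foldl (fun q i => q * PySem.List.pyGetD cand i 0) p) := by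
            conv_rhs => rw [hintR]
            have hunf : pvCwr (Int.ofNat s :: pvIntR (s + 1)) (r + 1) =
                ((pvCwr (Int.ofNat s :: pvIntR (s + 1)) r).map (fun c => Int.ofNat s :: c)) ++
                  pvCwr (pvIntR (s + 1)) (r + 1) := by
              simp [pvCwr]
            rw [hunf, List.map_append, List.map_map, ← hintR]
            simp [Function.comp_def]

-- the inner range(order) loop of A computes the fold-product of the combination
theorem pvA_inner (cand combo : List Int) (order : Int)
    (hlen : (combo.length : Int) = order) :
    (PySem.List.pyRange 0 order 1).foldl
        (fun p s => p * PySem.List.pyGetD cand (PySem.List.pyGetD combo s 0) 0) 1 =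
      combo.foldl (fun q i => q * PySem.List.pyGetD cand i 0) 1 := by
  rw [← hlen]
  exact PySem.List.foldl_pyRange_zero_pyGetD' combo 0
    (fun acc x => acc * PySem.List.pyGetD cand x 0) 1

-- ===== VERDICT (by name: the statement is the Claim_ definition above) =====
theorem BuildLib_spec : Claim_equal_BuildLib := by
  intro candidates order _ hpre
  obtain ⟨hord, -⟩ := hpre
  unfold Spec_BuildLib BuildLib BuildLib_alt
  have h0 : pvIntR 0 = [0, 1, 2, 3] := by decide
  rw [pvDfs_eq candidates order.toNat 4 0 (by omega) 1, h0]
  refine List.map_congr_left ?_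
  intro combo hcombo
  exact pvA_inner candidates combo order
    (by rw [pvCwr_length _ _ combo hcombo]; omega)
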